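-- pv_equiv track=rewrite | github.com/roshantac/fixmissingpath | dataset.py | occur
-- ===== SOURCE A (Python) =====
-- def occur(st):
--     count = 0
--     idx = 0
--     for i in st:
--         idx+=1
--         if (i == '_'):
--             count += 1
--         if count==2:
--             break
--     return idx-1
-- ===== SOURCE B (Python) =====
-- def occur(st):
--     i = st.find('_')
--     if i == -1:
--         return len(st) - 1
--     j = st.find('_', i + 1)
--     return j if j != -1 else len(st) - 1
-- ===== Notes on version B (the rewrite author's own statement) =====
-- stated objective: faster
-- what changed: Replaced the per-character counting loop by two str.find calls (first underscore, then the next one from i+1), falling back to len(st)-1 when fewer than two underscores exist.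
import Mathlib
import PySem

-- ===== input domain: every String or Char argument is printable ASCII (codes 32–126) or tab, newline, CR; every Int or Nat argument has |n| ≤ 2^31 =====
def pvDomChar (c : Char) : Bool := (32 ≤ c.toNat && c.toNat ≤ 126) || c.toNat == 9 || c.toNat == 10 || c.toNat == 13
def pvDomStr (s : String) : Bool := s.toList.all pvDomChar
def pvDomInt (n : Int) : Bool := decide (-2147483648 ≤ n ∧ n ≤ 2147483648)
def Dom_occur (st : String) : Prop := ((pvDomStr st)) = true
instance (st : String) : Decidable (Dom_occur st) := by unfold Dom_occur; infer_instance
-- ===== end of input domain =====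

-- B replaces A's per-character counting loop with two str.find calls (objective: faster by constant factor / simpler).

-- ===== PORT A =====
-- the for-loop of A: state (count, idx); breaks as soon as count reaches 2
def occurLoop (cs : List Char) (count : Int) (idx : Int) : Int :=
  match cs with
  | [] => idx - 1
  | c :: rest =>
    let idx' := idx + 1
    let count' := if c = '_' then count + 1 else count
    if count' = 2 then idx' - 1 else occurLoop rest count' idx'

def occur (st : String) : Int := occurLoop st.toList 0 0

-- ===== PORT B =====
def occur_alt (st : String) : Int :=
  let i := PySem.Str.find st "_"
  if i = -1 then (PySem.Str.len st : Int) - 1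
  else
    let j := PySem.Str.findFrom st "_" (i + 1)
    if j ≠ -1 then j else (PySem.Str.len st : Int) - 1

-- ===== PRECONDITION & SPEC =====
def Spec_occur (st : String) (out : Int) : Prop := out = occur_alt st
instance (st : String) (out : Int) : Decidable (Spec_occur st out) := by unfold Spec_occur; infer_instance

-- ===== CLAIM (what is proved, stated in full; the proofs are below) =====
def Claim_equal_occur : Prop := ∀ (st : String), Dom_occur st → Spec_occur st (occur st)

-- ===== LEMMAS AND PROOFS =====

theorem go_shift (cs : List Char) (k : Nat) :
    PySem.Chars.find.go ['_'] cs k =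
      if PySem.Chars.find cs ['_'] = -1 then -1 else (k : Int) + PySem.Chars.find cs ['_'] := by
  induction cs generalizing k with
  | nil => simp [PySem.Chars.find.go, PySem.Chars.find]
  | cons c rest ih =>
    by_cases hc : c = '_'
    · subst hc
      simp [PySem.Chars.find.go, PySem.Chars.find, List.isPrefixOf]
    · have hp : List.isPrefixOf ['_'] (c :: rest) = false := by
        simp [List.isPrefixOf, hc]
        exact fun h => absurd h.symm hc
      rw [PySem.Chars.find.go, hp]
      simp only [Bool.false_eq_true, if_false]
      rw [ih (k+1)]
      have hfind : PySem.Chars.find (c :: rest) ['_'] =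
          if PySem.Chars.find rest ['_'] = -1 then -1 else 1 + PySem.Chars.find rest ['_'] := by
        rw [PySem.Chars.find, PySem.Chars.find.go, hp]
        simp only [Bool.false_eq_true, if_false]
        rw [ih 1]; norm_num
      rw [hfind]
      by_cases h : PySem.Chars.find rest ['_'] = -1 
      · simp [h]
      · simp [h]
        have hge := PySem.Chars.neg_one_le_find rest ['_']
        rw [if_neg (by omega)]; ring


theorem find_cons_ne (c : Char) (rest : List Char) (hc : ¬ c = '_') :
    PySem.Chars.find (c :: rest) ['_'] =
      if PySem.Chars.find rest ['_'] = -1 then -1 else 1 + PySem.Chars.find rest ['_'] := by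
  have hp : List.isPrefixOf ['_'] (c :: rest) = false := by
    simp [List.isPrefixOf]
    exact fun h => absurd h.symm hc
  rw [PySem.Chars.find, PySem.Chars.find.go, hp]
  simp only [Bool.false_eq_true, if_false]
  rw [go_shift rest 1]; norm_num

theorem find_cons_us (rest : List Char) : PySem.Chars.find ('_' :: rest) ['_'] = 0 := by
  simp [PySem.Chars.find, PySem.Chars.find.go, List.isPrefixOf]

theorem loop1 (cs : List Char) (idx : Int) :
    occurLoop cs 1 idx =
      if PySem.Chars.find cs ['_'] = -1 then idx + cs.length - 1
      else idx + PySem.Chars.find cs ['_'] := by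
  induction cs generalizing idx with
  | nil => simp [occurLoop, PySem.Chars.find, PySem.Chars.find.go]
  | cons c rest ih =>
    by_cases hc : c = '_'
    · subst hc
      simp [occurLoop, find_cons_us]
    · rw [show occurLoop (c :: rest) 1 idx = occurLoop rest 1 (idx + 1) by
        simp [occurLoop, hc], ih, find_cons_ne c rest hc]
      have hge := PySem.Chars.neg_one_le_find rest ['_']
      by_cases h : PySem.Chars.find rest ['_'] = -1
      · simp [h]; push_cast; ring
      · rw [if_neg h, if_neg (by omega), if_neg (by omega)]; ring

theorem loop0 (cs : List Char) (idx : Int) :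
    occurLoop cs 0 idx =
      if PySem.Chars.find cs ['_'] = -1 then idx + cs.length - 1
      else occurLoop (cs.drop ((PySem.Chars.find cs ['_']).toNat + 1)) 1
             (idx + PySem.Chars.find cs ['_'] + 1) := by
  induction cs generalizing idx with
  | nil => simp [occurLoop, PySem.Chars.find, PySem.Chars.find.go]
  | cons c rest ih =>
    by_cases hc : c = '_'
    · subst hc
      simp [occurLoop, find_cons_us]
    · rw [show occurLoop (c :: rest) 0 idx = occurLoop rest 0 (idx + 1) by
        simp [occurLoop, hc], ih, find_cons_ne c rest hc]
      have hge := PySem.Chars.neg_one_le_find rest ['_']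
      by_cases h : PySem.Chars.find rest ['_'] = -1
      · simp [h]; push_cast; ring
      · rw [if_neg h, if_neg (by omega), if_neg (by omega)]
        have ht : (1 + PySem.Chars.find rest ['_']).toNat + 1
            = (PySem.Chars.find rest ['_']).toNat + 1 + 1 := by omega
        rw [ht]
        simp [List.drop]
        ring_nf

theorem main (st : String) :
    occurLoop st.toList 0 0 =
      (let i := PySem.Str.find st "_"
       if i = -1 then (PySem.Str.len st : Int) - 1
       else
         let j := PySem.Str.findFrom st "_" (i + 1)
         if j ≠ -1 then j else (PySem.Str.len st : Int) - 1) := by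
  simp only [PySem.Str.find_eq, PySem.Str.findFrom_eq, PySem.Str.len_eq, PySem.Chars.len_eq]
  simp only [show ("_" : String).toList = ['_'] from rfl]
  set cs := st.toList with hcs
  have hge := PySem.Chars.neg_one_le_find cs ['_']
  rw [loop0]
  by_cases h : PySem.Chars.find cs ['_'] = -1
  · simp [h]
  · have h0 : 0 ≤ PySem.Chars.find cs ['_'] := by omega
    have hsp := (PySem.Chars.find_spec (s := cs) (sub := ['_']) h0).1
    have hlt : (PySem.Chars.find cs ['_']).toNat < cs.length := by
      by_contra hn
      rw [List.drop_eq_nil_of_le (by omega)] at hsp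
      simp at hsp
    rw [if_neg h, if_neg h, loop1]
    have hk : ((PySem.Chars.find cs ['_']).toNat + 1 : Nat) ≤ cs.length := by omega
    have hstart : PySem.Chars.find cs ['_'] + 1
        = (((PySem.Chars.find cs ['_']).toNat + 1 : Nat) : Int) := by omega
    rw [hstart, PySem.Chars.findFrom_natCast cs ['_'] _ hk]
    have hdl : (cs.drop ((PySem.Chars.find cs ['_']).toNat + 1)).length
        = cs.length - ((PySem.Chars.find cs ['_']).toNat + 1) := List.length_drop
    have hge2 := PySem.Chars.neg_one_le_find (cs.drop ((PySem.Chars.find cs ['_']).toNat + 1)) ['_']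
    by_cases h2 : PySem.Chars.find (cs.drop ((PySem.Chars.find cs ['_']).toNat + 1)) ['_'] = -1
    · rw [if_pos h2, if_pos h2, if_neg (by simp), hdl]
      push_cast
      omega
    · rw [if_neg h2, if_neg h2, if_pos (by omega)]
      push_cast
      omega

-- ===== VERDICT (by name: the statement is the Claim_ definition above) =====
theorem occur_spec : Claim_equal_occur := by
  intro st _
  unfold Spec_occur occur occur_alt
  exact main st
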